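-- pv_equiv track=rewrite | github.com/Saint-Sam/Digifly-Public | Phase 2/digifly/phase2/workbench/validation.py | parse_path_list
-- ===== SOURCE A (Python) =====
-- from typing import Any, Dict, Iterable, List, Mapping
--
-- def parse_path_list(raw: Any) -> List[str]:
--     if raw is None:
--         return []
--     text = str(raw).strip()
--     if not text:
--         return []
--     text = text.replace("\n", ",")
--     return [chunk.strip() for chunk in text.split(",") if chunk.strip()]
-- ===== SOURCE B (Python) =====
-- def parse_path_list(raw):
--     if raw is None:
--         return []
--     out = []
--     buf = []
--     for ch in str(raw):
--         if ch == "\n" or ch == ",":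
--             c = "".join(buf).strip()
--             if c:
--                 out.append(c)
--             buf = []
--         else:
--             buf.append(ch)
--     c = "".join(buf).strip()
--     if c:
--         out.append(c)
--     return out
-- ===== Notes on version B (the rewrite author's own statement) =====
-- stated objective: alternative
-- what changed: Replaces A's staged pipeline (whole-string strip, replace of newlines by commas, split, list comprehension) with a single left-to-right character scan: a state machine that accumulates the current chunk in a buffer and flushes the stripped buffer to the output whenever a separator character ('\n' or ',') or the end of string is reached.
import Mathlib
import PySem

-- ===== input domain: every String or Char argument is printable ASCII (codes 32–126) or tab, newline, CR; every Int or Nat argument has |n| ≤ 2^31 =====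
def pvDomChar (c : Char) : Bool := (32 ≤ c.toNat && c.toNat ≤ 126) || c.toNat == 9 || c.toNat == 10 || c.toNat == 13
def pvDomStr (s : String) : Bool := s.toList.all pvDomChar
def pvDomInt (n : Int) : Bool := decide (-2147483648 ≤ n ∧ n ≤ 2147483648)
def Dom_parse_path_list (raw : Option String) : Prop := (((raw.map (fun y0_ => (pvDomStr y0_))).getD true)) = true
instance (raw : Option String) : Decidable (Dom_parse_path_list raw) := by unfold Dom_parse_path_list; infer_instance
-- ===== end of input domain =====

-- B replaces A's staged pipeline (whole-string strip, newline→comma replace, split, comprehension)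
-- by a single left-to-right character scan: a state machine accumulating the current chunk in a
-- buffer and flushing the stripped buffer on each separator and at the end (objective: alternative).

-- ===== PORT A =====
def parse_path_list (raw : Option String) : List String :=
  match raw with
  | none => []
  | some s =>
    let text := PySem.Str.strip s
    if text = "" then []
    else
      let text2 := PySem.Str.replace text "\n" ","
      (((PySem.Str.split? text2 ",").getD []).filter
          (fun chunk => PySem.Str.strip chunk != "")).map (fun chunk => PySem.Str.strip chunk)

-- ===== PORT B =====
-- Source B's character scan: buf accumulates the current chunk ("".join(buf).strip() over a list of
-- chars is PySem.Chars.strip of the list); on '\n'/',' or at the end the stripped buffer is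
-- appended to the output if non-empty.
def parse_path_list_alt (raw : Option String) : List String :=
  match raw with
  | none => []
  | some s =>
    let st := s.toList.foldl (fun (st : List String × List Char) ch =>
      if ch == '\n' || ch == ',' then
        let c := PySem.Chars.strip st.2
        (if c.isEmpty then st.1 else st.1 ++ [String.ofList c], [])
      else (st.1, st.2 ++ [ch])) ([], [])
    let c := PySem.Chars.strip st.2
    if c.isEmpty then st.1 else st.1 ++ [String.ofList c]

-- ===== PRECONDITION & SPEC =====
def Spec_parse_path_list (raw : Option String) (out : List String) : Prop := out = parse_path_list_alt raw
instance (raw : Option String) (out : List String) : Decidable (Spec_parse_path_list raw out) := by unfold Spec_parse_path_list; infer_instance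

-- ===== CLAIM (what is proved, stated in full; the proofs are below) =====
def Claim_equal_parse_path_list : Prop := ∀ (raw : Option String), Dom_parse_path_list raw → Spec_parse_path_list raw (parse_path_list raw)

-- ===== LEMMAS AND PROOFS =====
-- abbreviations for this development
def pvSub (c : Char) : Char := if c == '\n' then ',' else c
def pvSep (c : Char) : Bool := c == '\n' || c == ','
def pvF (l : List Char) : List (List Char) :=
  ((List.splitOnP pvSep l).map PySem.Chars.strip).filter (fun x => !x.isEmpty)

-- 1. splitOn with a single-char separator is splitOnP
theorem go_split (a : Char) : ∀ (l : List Char) (fuel : Nat) (cur : List Char) (acc : List (List Char)),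
    l.length ≤ fuel →
    PySem.Chars.splitOn.go [a] fuel l cur acc
      = acc.reverse ++ (List.splitOnP (· == a) l).modifyHead (cur.reverse ++ ·) := by
  intro l
  induction l with
  | nil =>
    intro fuel cur acc _
    rw [PySem.Chars.splitOn.go.eq_def]
    cases fuel <;> simp
  | cons c rest ih =>
    intro fuel cur acc hf
    cases fuel with
    | zero => simp at hf
    | succ f =>
      have step : PySem.Chars.splitOn.go [a] (f+1) (c::rest) cur acc
          = if [a].isPrefixOf (c::rest) = true
            then PySem.Chars.splitOn.go [a] f (List.drop [a].length (c::rest)) [] (cur.reverse :: acc)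
            else PySem.Chars.splitOn.go [a] f rest (c :: cur) acc := rfl
      rw [step]
      have hpre : List.isPrefixOf [a] (c :: rest) = (c == a) := by
        simp [List.isPrefixOf, BEq.comm]
      rw [hpre]
      by_cases hca : c = a
      · simp only [hca, BEq.rfl, if_true]
        rw [show List.drop [a].length (a :: rest) = rest by simp]
        rw [ih _ [] _ (by simpa using Nat.le_of_succ_le_succ hf)]
        rcases hsp : List.splitOnP (· == a) rest with _ | ⟨h0, t0⟩
        · exact absurd hsp (List.splitOnP_ne_nil _ _)
        · simp [List.splitOnP_cons, hsp]
      · have : (c == a) = false := by simp [hca]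
        rw [this, if_neg (by simp)]
        rw [ih _ (c :: cur) _ (by simpa using Nat.le_of_succ_le_succ hf)]
        rcases hsp : List.splitOnP (· == a) rest with _ | ⟨h0, t0⟩
        · exact absurd hsp (List.splitOnP_ne_nil _ _)
        · simp [List.splitOnP_cons, this, hsp]

theorem splitOn_single (a : Char) (l : List Char) :
    PySem.Chars.splitOn l [a] = List.splitOnP (· == a) l := by
  unfold PySem.Chars.splitOn
  rw [go_split a l _ [] [] (by omega)]
  rcases hsp : List.splitOnP (· == a) l with _ | ⟨h0, t0⟩
  · exact absurd hsp (List.splitOnP_ne_nil _ _)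
  · simp

-- 2. replace of a single char by a single char is map
theorem go_rep : ∀ (l : List Char) (fuel : Nat) (acc : List Char),
    l.length ≤ fuel →
    PySem.Chars.replace.go ['\n'] [','] fuel l acc = acc.reverse ++ l.map pvSub := by
  intro l
  induction l with
  | nil =>
    intro fuel acc _
    rw [PySem.Chars.replace.go.eq_def]
    cases fuel <;> simp
  | cons c rest ih =>
    intro fuel acc hf
    cases fuel with
    | zero => simp at hf
    | succ f =>
      have step : PySem.Chars.replace.go ['\n'] [','] (f+1) (c::rest) acc
          = if ['\n'].isPrefixOf (c::rest) = true
            then PySem.Chars.replace.go ['\n'] [','] f (List.drop ['\n'].length (c::rest)) ([','].reverse ++ acc)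
            else PySem.Chars.replace.go ['\n'] [','] f rest (c :: acc) := rfl
      rw [step]
      have hpre : List.isPrefixOf ['\n'] (c :: rest) = (c == '\n') := by
        simp [List.isPrefixOf, BEq.comm]
      rw [hpre]
      by_cases hc : c = '\n'
      · simp only [hc, BEq.rfl, if_true]
        rw [show List.drop ['\n'].length ('\n' :: rest) = rest by simp]
        rw [ih _ _ (by simpa using Nat.le_of_succ_le_succ hf)]
        simp [pvSub]
      · have : (c == '\n') = false := by simp [hc]
        rw [this, if_neg (by simp)]
        rw [ih _ _ (by simpa using Nat.le_of_succ_le_succ hf)]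
        simp [pvSub, this]

theorem replace_single (l : List Char) :
    PySem.Chars.replace l ['\n'] [','] = l.map pvSub := by
  unfold PySem.Chars.replace
  rw [if_neg (by simp)]
  exact go_rep l _ [] (by omega)

-- 3. splitting the substituted string on ',' = splitting the original on both separators
theorem map_sub_split (l : List Char) :
    List.splitOnP (· == ',') (l.map pvSub) = List.splitOnP pvSep l := by
  induction l with
  | nil => simp
  | cons c t ih =>
    by_cases hn : c = '\n'
    · simp [List.splitOnP_cons, pvSub, pvSep, hn, ih]
    · by_cases hcm : c = ','
      · simp [List.splitOnP_cons, pvSub, pvSep, hcm, ih]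
      · simp [List.splitOnP_cons, pvSub, pvSep, hn, hcm, ih]

-- ===== strip / whitespace lemmas =====
theorem strip_cons_space {c : Char} (hc : PySem.Chars.isspace c = true) (h : List Char) :
    PySem.Chars.strip (c :: h) = PySem.Chars.strip h := by
  simp [PySem.Chars.strip, PySem.Chars.lstrip, hc]

theorem strip_eq_nil_of_space {x : List Char} (hx : ∀ c ∈ x, PySem.Chars.isspace c = true) :
    PySem.Chars.strip x = [] := by
  have h1 : PySem.Chars.lstrip x = [] := by
    simp [PySem.Chars.lstrip, List.dropWhile_eq_nil_iff]; exact hx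
  simp [PySem.Chars.strip, h1, PySem.Chars.rstrip]

theorem rstrip_append_space {sp : List Char} (hsp : ∀ c ∈ sp, PySem.Chars.isspace c = true)
    (x : List Char) : PySem.Chars.rstrip (x ++ sp) = PySem.Chars.rstrip x := by
  have h1 : List.dropWhile PySem.Chars.isspace sp.reverse = [] := by
    simp [List.dropWhile_eq_nil_iff]; intro c hc; exact hsp c hc
  simp [PySem.Chars.rstrip, List.reverse_append, List.dropWhile_append, h1]

theorem strip_append_space {sp : List Char} (hsp : ∀ c ∈ sp, PySem.Chars.isspace c = true)
    (x : List Char) : PySem.Chars.strip (x ++ sp) = PySem.Chars.strip x := by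
  have hspnil : List.dropWhile PySem.Chars.isspace sp = [] := by
    simp [List.dropWhile_eq_nil_iff]; exact hsp
  by_cases hx : List.dropWhile PySem.Chars.isspace x = []
  · have h2 : PySem.Chars.lstrip (x ++ sp) = [] := by
      simp [PySem.Chars.lstrip, List.dropWhile_append, hx, hspnil]
    have h3 : PySem.Chars.lstrip x = [] := hx
    rw [PySem.Chars.strip, h2, PySem.Chars.strip, h3]
  · have : PySem.Chars.lstrip (x ++ sp) = List.dropWhile PySem.Chars.isspace x ++ sp := by
      simp [PySem.Chars.lstrip, List.dropWhile_append, hx]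
    rw [PySem.Chars.strip, this, rstrip_append_space hsp]
    rfl

theorem rstrip_decomp (x : List Char) :
    ∃ sp, (∀ c ∈ sp, PySem.Chars.isspace c = true) ∧ x = PySem.Chars.rstrip x ++ sp := by
  refine ⟨(List.takeWhile PySem.Chars.isspace x.reverse).reverse, ?_, ?_⟩
  · intro c hc
    rw [List.mem_reverse] at hc
    exact List.mem_takeWhile_imp hc
  · rw [PySem.Chars.rstrip, ← List.reverse_append, List.takeWhile_append_dropWhile,
      List.reverse_reverse]

-- chunks of an all-whitespace string are all-whitespace
theorem split_space_chunks {ws : List Char} (hws : ∀ c ∈ ws, PySem.Chars.isspace c = true) :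
    ∀ x ∈ List.splitOnP pvSep ws, ∀ c ∈ x, PySem.Chars.isspace c = true := by
  induction ws with
  | nil => intro x hx; simp at hx; simp [hx]
  | cons c t ih =>
    intro x hx
    have hct : ∀ c' ∈ t, PySem.Chars.isspace c' = true := fun c' hc' => hws c' (by simp [hc'])
    rw [List.splitOnP_cons] at hx
    by_cases hc : pvSep c = true
    · rw [if_pos hc, List.mem_cons] at hx
      rcases hx with rfl | hx
      · simp
      · exact ih hct x hx
    · rw [if_neg hc] at hx
      obtain ⟨h0, t0, hsp⟩ := List.exists_cons_of_ne_nil (List.splitOnP_ne_nil pvSep t)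
      rw [hsp] at hx
      simp only [List.modifyHead_cons, List.mem_cons] at hx
      rcases hx with rfl | hx
      · intro d hd
        rw [List.mem_cons] at hd
        rcases hd with rfl | hd
        · exact hws d (by simp)
        · exact ih hct h0 (by simp [hsp]) d hd
      · exact ih hct x (by simp [hsp, hx])

-- append law for splitOnP, existential form
theorem splitOnP_append' (p : Char → Bool) (xs ys : List Char) :
    ∃ pre last, List.splitOnP p xs = pre ++ [last] ∧
      List.splitOnP p (xs ++ ys) = pre ++ (List.splitOnP p ys).modifyHead (last ++ ·) := by
  induction xs with
  | nil =>
    refine ⟨[], [], by simp, ?_⟩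
    rcases h : List.splitOnP p ys with _ | ⟨h0, t0⟩
    · exact absurd h (List.splitOnP_ne_nil _ _)
    · simp [h]
  | cons c xs ih =>
    obtain ⟨pre, last, h1, h2⟩ := ih
    rw [List.cons_append]
    by_cases hc : p c = true
    · exact ⟨[] :: pre, last, by simp [List.splitOnP_cons, hc, h1],
        by simp [List.splitOnP_cons, hc, h2]⟩
    · cases pre with
      | nil =>
        refine ⟨[], c :: last, by simp [List.splitOnP_cons, hc, h1], ?_⟩
        rw [List.splitOnP_cons, if_neg hc, h2]
        rcases h : List.splitOnP p ys with _ | ⟨h0, t0⟩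
        · exact absurd h (List.splitOnP_ne_nil _ _)
        · simp
      | cons q qs =>
        refine ⟨(c :: q) :: qs, last, by simp [List.splitOnP_cons, hc, h1], ?_⟩
        rw [List.splitOnP_cons, if_neg hc, h2]
        simp

-- ===== pvF lemmas =====
theorem pvF_nil : pvF [] = [] := by
  simp [pvF, PySem.Chars.strip, PySem.Chars.lstrip, PySem.Chars.rstrip]

theorem pvF_cons_space {c : Char} (hc : PySem.Chars.isspace c = true) (l : List Char) :
    pvF (c :: l) = pvF l := by
  by_cases hp : pvSep c = true
  · simp [pvF, List.splitOnP_cons, hp, PySem.Chars.strip, PySem.Chars.lstrip, PySem.Chars.rstrip]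
  · obtain ⟨h0, t0, hS⟩ := List.exists_cons_of_ne_nil (List.splitOnP_ne_nil pvSep l)
    rw [pvF, pvF, List.splitOnP_cons, if_neg hp, hS]
    simp only [List.modifyHead_cons, List.map_cons, List.filter_cons]
    rw [strip_cons_space hc]

theorem pvF_lstrip (l : List Char) : pvF (PySem.Chars.lstrip l) = pvF l := by
  induction l with
  | nil => rfl
  | cons c t ih =>
    by_cases hc : PySem.Chars.isspace c = true
    · rw [show PySem.Chars.lstrip (c :: t) = PySem.Chars.lstrip t by
        simp [PySem.Chars.lstrip, hc], ih, pvF_cons_space hc]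
    · rw [show PySem.Chars.lstrip (c :: t) = c :: t by simp [PySem.Chars.lstrip, hc]]

theorem pvF_append_space {sp : List Char} (hsp : ∀ c ∈ sp, PySem.Chars.isspace c = true)
    (x : List Char) : pvF (x ++ sp) = pvF x := by
  obtain ⟨pre, last, h1, h2⟩ := splitOnP_append' pvSep x sp
  obtain ⟨h0, t0, hS⟩ := List.exists_cons_of_ne_nil (List.splitOnP_ne_nil pvSep sp)
  have hchunks := split_space_chunks hsp
  rw [hS] at hchunks
  have hh0 : ∀ c ∈ h0, PySem.Chars.isspace c = true := hchunks h0 (by simp)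
  have ht0 : ∀ y ∈ t0, PySem.Chars.strip y = [] := fun y hy =>
    strip_eq_nil_of_space (hchunks y (by simp [hy]))
  have hjunk : ((t0.map PySem.Chars.strip).filter (fun x => !x.isEmpty)) = [] := by
    rw [List.filter_eq_nil_iff]
    intro a ha
    simp only [List.mem_map] at ha
    obtain ⟨y, hy, rfl⟩ := ha
    simp [ht0 y hy]
  rw [pvF, pvF, h1, h2, hS]
  simp only [List.modifyHead_cons, List.map_append, List.filter_append, List.map_cons,
    List.map_nil, List.filter_cons, List.filter_nil]
  rw [strip_append_space hh0]
  simp [hjunk]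

theorem pvF_rstrip (l : List Char) : pvF (PySem.Chars.rstrip l) = pvF l := by
  obtain ⟨sp, hsp, hdec⟩ := rstrip_decomp l
  conv_rhs => rw [hdec]
  rw [pvF_append_space hsp]

theorem pvF_strip (l : List Char) : pvF (PySem.Chars.strip l) = pvF l := by
  rw [show PySem.Chars.strip l = PySem.Chars.rstrip (PySem.Chars.lstrip l) from rfl,
    pvF_rstrip, pvF_lstrip]

-- ===== bridges =====
theorem split?_single (s : String) (a : Char) (sep : String) (hsep : sep.toList = [a]) :
    (PySem.Str.split? s sep).getD []
      = (List.splitOnP (· == a) s.toList).map String.ofList := by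
  rw [PySem.Str.split?]
  rw [hsep]
  rw [show PySem.Chars.split? s.toList [a] = some (PySem.Chars.splitOn s.toList [a]) by
    simp [PySem.Chars.split?]]
  rw [splitOn_single]
  rfl

theorem strip_ofList (y : List Char) :
    PySem.Str.strip (String.ofList y) = String.ofList (PySem.Chars.strip y) := by
  simp [PySem.Str.strip]

theorem ne_empty_ofList (y : List Char) :
    (String.ofList y != "") = !y.isEmpty := by
  by_cases h : y = []
  · subst h; rfl
  · have h1 : String.ofList y ≠ "" := fun hh => h (by simpa using congrArg String.toList hh)
    have h2 : y.isEmpty = false := by simp [h]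
    simp [h1, h2]

theorem filter_map_swap (L : List (List Char)) :
    (((L.map String.ofList).filter (fun c => PySem.Str.strip c != "")).map
        (fun c => PySem.Str.strip c))
      = ((L.map PySem.Chars.strip).filter (fun x => !x.isEmpty)).map String.ofList := by
  induction L with
  | nil => rfl
  | cons y L ih =>
    simp only [List.map_cons, List.filter_cons, strip_ofList, ne_empty_ofList]
    by_cases h : (PySem.Chars.strip y).isEmpty = true
    · simp [h, ih]
    · simp only [h]
      simp [ih, strip_ofList]

-- ===== B-side scan lemmas =====
def pvFlush (o : List String) (b : List Char) : List String :=
  let c := PySem.Chars.strip b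
  if c.isEmpty then o else o ++ [String.ofList c]

theorem splitOnP_sepfree {p : Char → Bool} : ∀ {xs : List Char},
    (∀ c ∈ xs, p c = false) → List.splitOnP p xs = [xs] := by
  intro xs
  induction xs with
  | nil => intro _; simp
  | cons c t ih =>
    intro h
    rw [List.splitOnP_cons, if_neg (by simp [h c (by simp)])]
    rw [ih (fun c' hc' => h c' (by simp [hc']))]
    rfl

theorem splitOnP_sepfree_sep {p : Char → Bool} {c : Char} (hc : p c = true) :
    ∀ {xs : List Char}, (∀ d ∈ xs, p d = false) → ∀ (l : List Char),
    List.splitOnP p (xs ++ c :: l) = xs :: List.splitOnP p l := by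
  intro xs
  induction xs with
  | nil =>
    intro _ l
    simp [List.splitOnP_cons, hc]
  | cons d t ih =>
    intro h l
    rw [List.cons_append, List.splitOnP_cons, if_neg (by simp [h d (by simp)])]
    rw [ih (fun d' hd' => h d' (by simp [hd'])) l]
    rfl

-- with a separator-free buffer, pvF of the buffer is exactly one (possibly dropped) chunk
theorem pvF_sepfree {buf : List Char} (h : ∀ c ∈ buf, pvSep c = false) :
    (pvF buf).map String.ofList = pvFlush [] buf := by
  rw [pvF, splitOnP_sepfree h]
  by_cases he : (PySem.Chars.strip buf).isEmpty = true
  · simp [pvFlush, he]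
  · simp [pvFlush, he]

theorem pvFlush_append (o : List String) (b : List Char) :
    pvFlush o b = o ++ pvFlush [] b := by
  unfold pvFlush
  by_cases h : (PySem.Chars.strip b).isEmpty = true <;> simp [h]

-- the scan invariant: folding the step function then flushing equals pvF of buffer ++ rest
theorem scan_eq : ∀ (l : List Char) (out : List String) (buf : List Char),
    (∀ c ∈ buf, pvSep c = false) →
    (let st := l.foldl (fun (st : List String × List Char) ch =>
        if ch == '\n' || ch == ',' then
          let c := PySem.Chars.strip st.2
          (if c.isEmpty then st.1 else st.1 ++ [String.ofList c], [])
        else (st.1, st.2 ++ [ch])) (out, buf)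
     pvFlush st.1 st.2)
      = out ++ (pvF (buf ++ l)).map String.ofList := by
  intro l
  induction l with
  | nil =>
    intro out buf h
    simp only [List.foldl_nil, List.append_nil]
    rw [pvF_sepfree h, pvFlush_append]
  | cons c t ih =>
    intro out buf h
    simp only [List.foldl_cons]
    by_cases hc : (c == '\n' || c == ',') = true
    · rw [if_pos hc]
      have hrec := ih (if (PySem.Chars.strip buf).isEmpty then out else out ++ [String.ofList (PySem.Chars.strip buf)]) [] (by simp)
      simp only [List.nil_append] at hrec
      rw [hrec]
      have hsep : pvSep c = true := hc
      conv_rhs => rw [pvF, splitOnP_sepfree_sep hsep h t]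
      simp only [List.map_cons, List.filter_cons]
      by_cases he : (PySem.Chars.strip buf).isEmpty = true
      · simp [he, pvF]
      · simp [he, pvF]
    · rw [if_neg hc]
      have h' : ∀ d ∈ buf ++ [c], pvSep d = false := by
        intro d hd
        rcases List.mem_append.mp hd with hd | hd
        · exact h d hd
        · simp at hd; subst hd
          simpa [pvSep] using hc
      have := ih out (buf ++ [c]) h'
      simpa using this

-- ===== main =====
theorem main_eq (raw : Option String) : parse_path_list raw = parse_path_list_alt raw := by
  cases raw with
  | none => rfl
  | some s =>
    -- B side: the scan computes pvF of the raw character list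
    have hB : parse_path_list_alt (some s) = (pvF s.toList).map String.ofList := by
      have := scan_eq s.toList [] [] (by simp)
      simpa [parse_path_list_alt, pvFlush] using this
    rw [hB]
    -- A side
    show (if PySem.Str.strip s = "" then ([] : List String) else _) = _
    by_cases hempty : PySem.Str.strip s = ""
    · rw [if_pos hempty]
      have : PySem.Chars.strip s.toList = [] := by
        rw [← PySem.Str.toList_strip, hempty]; rfl
      rw [← pvF_strip, this, pvF_nil]
      rfl
    · rw [if_neg hempty]
      rw [split?_single _ ',' "," rfl]
      rw [PySem.Str.toList_replace, PySem.Str.toList_strip]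
      rw [show ("\n" : String).toList = ['\n'] from rfl,
        show ("," : String).toList = [','] from rfl]
      rw [replace_single, map_sub_split]
      rw [filter_map_swap]
      rw [← pvF, pvF_strip]

-- ===== VERDICT (by name: the statement is the Claim_ definition above) =====
theorem parse_path_list_spec : Claim_equal_parse_path_list := by
  intro raw _
  unfold Spec_parse_path_list
  exact main_eq raw
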